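-- pv_equiv track=rewrite | github.com/alirahmani93/eager | eager_python/primery Python learning by JADI/Palindrom.py | mcs
-- ===== SOURCE A (Python) =====
-- def mcs(s):     # most common character      in use: @replace @lower @count
--     stripped_string = s.replace(" ", "")    # remove all white spaces
--     lowercase_stripped_string = stripped_string.lower()    # convert to lower case
--     sample_character = None
--     sample_maximum_count = 0
--
--     # Iterate through the given string and for each character
--     # set a count, among these counts,  return the character whose count is maximum
--     # On case of tie, return the last character that occurs that has the most count
--     for character in lowercase_stripped_string:
--         each_character_count = lowercase_stripped_string.count(character)
--         if each_character_count >= sample_maximum_count: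
--             sample_maximum_count = each_character_count
--             sample_character = character
--     return sample_character
-- ===== SOURCE B (Python) =====
-- def mcs(s):
--     cleaned = s.replace(" ", "").lower()
--     if not cleaned:
--         return None
--     counts = {}
--     for c in cleaned:
--         counts[c] = counts.get(c, 0) + 1
--     m = max(counts.values())
--     for c in reversed(cleaned):
--         if counts[c] == m:
--             return c
-- ===== Notes on version B (the rewrite author's own statement) =====
-- stated objective: faster
-- what changed: A recounts the current character over the whole cleaned string at every loop step (quadratic running-max scan); B builds a character-count dictionary in one pass, takes the maximum of its values, and returns the first character of the reversed cleaned string whose count equals that maximum.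
import Mathlib
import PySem

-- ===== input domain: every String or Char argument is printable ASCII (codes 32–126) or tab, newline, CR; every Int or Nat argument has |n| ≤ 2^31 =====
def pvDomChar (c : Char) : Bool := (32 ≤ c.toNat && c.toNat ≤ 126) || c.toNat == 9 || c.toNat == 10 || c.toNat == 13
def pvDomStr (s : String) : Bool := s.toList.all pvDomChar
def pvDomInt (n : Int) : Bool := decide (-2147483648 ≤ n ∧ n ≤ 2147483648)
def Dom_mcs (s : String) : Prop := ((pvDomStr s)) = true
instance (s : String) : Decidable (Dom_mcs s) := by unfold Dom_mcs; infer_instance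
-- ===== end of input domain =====

-- B replaces A's quadratic running-max scan (recounting the character at every position) with one
-- counting pass over a dictionary followed by a back-to-front search for the maximal count: faster (asymptotic).


-- ===== PORT A =====
def mcs (s : String) : Option String :=
  let stripped_string := PySem.Str.replace s " " ""
  let lowercase_stripped_string := PySem.Str.lower stripped_string
  let r := lowercase_stripped_string.toList.foldl
    (fun (st : Option String × Int) character =>
      let each_character_count : Int :=
        (PySem.Str.count lowercase_stripped_string (String.singleton character) : Int)
      if st.2 ≤ each_character_count then (some (String.singleton character), each_character_count)
      else st)
    ((none : Option String), (0 : Int))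
  r.1

-- ===== PORT B =====
def mcs_alt (s : String) : Option String :=
  let cleaned := PySem.Str.lower (PySem.Str.replace s " " "")
  let cs := cleaned.toList
  if cs.isEmpty then none
  else
    let counts := cs.foldl
      (fun (d : PySem.Dict Char Int) c => d.insert c (d.getD c 0 + 1)) PySem.Dict.empty
    match PySem.List.max? counts.values (fun v => v) with
    | none => none   -- unreachable: counts is nonempty here
    | some m => (cs.reverse.find? (fun c => counts.getD c 0 == m)).map String.singleton

-- ===== PRECONDITION & SPEC =====
def Spec_mcs (s : String) (out : Option String) : Prop := out = mcs_alt s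
instance (s : String) (out : Option String) : Decidable (Spec_mcs s out) := by unfold Spec_mcs; infer_instance

-- ===== CLAIM (what is proved, stated in full; the proofs are below) =====
def Claim_equal_mcs : Prop := ∀ (s : String), Dom_mcs s → Spec_mcs s (mcs s)

-- ===== LEMMAS AND PROOFS =====

-- single-character substring count is the element count
theorem charsCount_go_singleton (c : Char) :
    ∀ (fuel : Nat) (l : List Char) (acc : Nat), l.length ≤ fuel →
      PySem.Chars.count.go [c] fuel l acc = acc + l.count c := by
  intro fuel
  induction fuel with
  | zero =>
    intro l acc h
    cases l with
    | nil => simp [PySem.Chars.count.go]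
    | cons hd t => simp at h
  | succ n ih =>
    intro l acc h
    cases l with
    | nil => simp [PySem.Chars.count.go]
    | cons hd t =>
      simp only [List.length_cons, Nat.succ_le_succ_iff] at h
      by_cases hc : c = hd
      · subst hc
        simp [PySem.Chars.count.go, List.isPrefixOf, ih t (acc + 1) h]
        omega
      · have : ([c].isPrefixOf (hd :: t)) = false := by
          simp [List.isPrefixOf, hc]
        simp [PySem.Chars.count.go, this, ih t acc h, Ne.symm hc]

theorem charsCount_singleton (l : List Char) (c : Char) :
    PySem.Chars.count l [c] = l.count c := by
  simp [PySem.Chars.count, charsCount_go_singleton c l.length l 0 le_rfl]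

-- characterisation of A's running-max ≥-update loop: it ends on the LAST element of
-- maximal key, and that element is the first hit of a backward search
theorem afold_char (f : Char → Int) (hf : ∀ y, 0 ≤ f y) :
    ∀ (l : List Char), l ≠ [] →
      ∃ b ∈ l,
        (l.foldl (fun (st : Option String × Int) c =>
            if st.2 ≤ f c then (some (String.singleton c), f c) else st)
          ((none : Option String), (0 : Int))) = (some (String.singleton b), f b)
        ∧ (∀ y ∈ l, f y ≤ f b)
        ∧ l.reverse.find? (fun c => f c == f b) = some b := by
  intro l
  induction l using List.reverseRecOn with
  | nil => intro h; exact absurd rfl h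
  | append_singleton l a ih =>
    intro _
    rcases List.eq_nil_or_concat' l with rfl | ⟨l', a', rfl⟩
    · refine ⟨a, by simp, ?_, by simp, by simp⟩
      simp [hf a]
    · obtain ⟨b, hbmem, hfold, hmax, hfind⟩ := ih (by simp)
      rw [List.foldl_append, hfold]
      by_cases hcase : f b ≤ f a
      · refine ⟨a, by simp, ?_, ?_, ?_⟩
        · simp [hcase]
        · intro y hy
          rcases List.mem_append.mp hy with hy | hy
          · exact le_trans (hmax y hy) hcase
          · simp at hy; simp [hy]
        · simp
      · rw [not_le] at hcase
        refine ⟨b, List.mem_append_left _ hbmem, ?_, ?_, ?_⟩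
        · simp [not_le.mpr hcase]
        · intro y hy
          rcases List.mem_append.mp hy with hy | hy
          · exact hmax y hy
          · simp at hy; subst hy; exact le_of_lt hcase
        · have hne : (f a == f b) = false := by
            simp [ne_of_lt hcase]
          rw [List.reverse_append, List.reverse_singleton, List.singleton_append]
          simp only [List.find?_cons, hne]
          exact hfind

-- the counter's values are the counts of the distinct elements
theorem values_counter_char (l : List Char) : (PySem.Dict.counter l).values
    = (PySem.Set.ofList l).map (fun k => ((l.count k : Nat) : Int)) := by
  rw [PySem.Dict.values, PySem.Dict.items_counter, List.map_map]
  rfl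

-- ===== VERDICT (by name: the statement is the Claim_ definition above) =====
theorem mcs_spec : Claim_equal_mcs := by
  intro s _
  unfold Spec_mcs mcs mcs_alt
  simp only []
  generalize hcs : (PySem.Str.lower (PySem.Str.replace s " " "")).toList = cs
  by_cases hnil : cs = []
  · simp [hnil]
  · -- A's per-character count is the list count
    have hstep :
        (fun (st : Option String × Int) character =>
          if st.2 ≤ ((PySem.Str.count (PySem.Str.lower (PySem.Str.replace s " " ""))
              (String.singleton character) : Nat) : Int)
          then (some (String.singleton character),
                ((PySem.Str.count (PySem.Str.lower (PySem.Str.replace s " " ""))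
                  (String.singleton character) : Nat) : Int))
          else st)
        = (fun (st : Option String × Int) c =>
            if st.2 ≤ ((cs.count c : Nat) : Int)
            then (some (String.singleton c), ((cs.count c : Nat) : Int)) else st) := by
      funext st c
      rw [PySem.Str.count_eq, String.toList_singleton, charsCount_singleton, hcs]
    obtain ⟨b, hbmem, hfold, hmax, hfind⟩ :=
      afold_char (fun c => ((cs.count c : Nat) : Int)) (fun y => Int.natCast_nonneg _)
        cs hnil
    have hcounter :
        cs.foldl (fun (d : PySem.Dict Char Int) c => d.insert c (d.getD c 0 + 1))
          PySem.Dict.empty = PySem.Dict.counter cs :=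
      PySem.Dict.foldl_insert_getD_add_one_eq_counter cs
    -- the max of the counter's values exists and is b's count
    obtain ⟨m, hm⟩ : ∃ m, PySem.List.max? (PySem.Dict.counter cs).values (fun v => v) = some m := by
      cases hmq : PySem.List.max? (PySem.Dict.counter cs).values (fun v => v) with
      | none =>
        rw [PySem.List.max?_eq_none_iff, values_counter_char, List.map_eq_nil_iff] at hmq
        obtain ⟨c, hc⟩ := List.exists_mem_of_ne_nil cs hnil
        have hc' : c ∈ PySem.Set.ofList cs := (PySem.Set.mem_ofList cs c).mpr hc
        rw [hmq] at hc'
        exact absurd hc' (List.not_mem_nil)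
      | some m => exact ⟨m, rfl⟩
    have hmb : m = ((cs.count b : Nat) : Int) := by
      have h1 : m ≤ ((cs.count b : Nat) : Int) := by
        have hmm := PySem.List.max?_mem hm
        rw [values_counter_char] at hmm
        obtain ⟨k, hk, hkm⟩ := List.mem_map.mp hmm
        rw [PySem.Set.mem_ofList] at hk
        exact hkm ▸ hmax k hk
      have h2 : ((cs.count b : Nat) : Int) ≤ m := by
        have hmem : ((cs.count b : Nat) : Int) ∈ (PySem.Dict.counter cs).values := by
          rw [values_counter_char]
          exact List.mem_map.mpr ⟨b, (PySem.Set.mem_ofList cs b).mpr hbmem, rfl⟩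
        simpa using PySem.List.max?_isMax hm ((cs.count b : Nat) : Int) hmem
      omega
    have hnil' : (cs.isEmpty) = false := by simp [hnil]
    rw [hstep, hfold, hnil', hcounter, hm]
    have hpred : (fun c => (PySem.Dict.counter cs).getD c 0 == m)
        = (fun c => ((cs.count c : Nat) : Int) == ((cs.count b : Nat) : Int)) := by
      funext c
      rw [PySem.Dict.getD_counter, hmb]
    simp only [Bool.false_eq_true, if_false, hpred, hfind, Option.map_some]
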